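-- pv_equiv track=rewrite | github.com/T0chka/MLPermutationSolver | experiments/optimize_random_walks.py | compute_bfs_distances
-- ===== SOURCE A (Python) =====
-- from collections import deque
--
-- def compute_bfs_distances(generators: list, state_size: int) -> dict:
--     """
--     For starting sorted state [0, 1, ..., state_size-1],
--     compute the minimal number of moves (distance) to every reachable state.
--
--     The allowed moves are defined by the list 'generators', where a generator g
--     defines a move: new_state[i] = state[g[i]].
--     """
--     sorted_state = tuple(range(state_size))
--     distances = {sorted_state: 0}
--     queue = deque([sorted_state])
--
--     while queue:
--         state = queue.popleft()
--         current_distance = distances[state]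
--         for g in generators:
--             new_state = tuple(state[i] for i in g)
--             if new_state not in distances:
--                 distances[new_state] = current_distance + 1
--                 queue.append(new_state)
--     return distances
-- ===== SOURCE B (Python) =====
-- def compute_bfs_distances(generators: list, state_size: int) -> dict:
--     """
--     Staged computation: first enumerate the reachable states level by level,
--     keeping only a plain visited set (no distances during the search), then
--     label every state with its level index in a single final pass.
--     """
--     start = tuple(range(state_size))
--     seen = {start}
--     levels = [[start]]
--     while levels[-1]:
--         frontier = []
--         for state in levels[-1]:
--             for g in generators:
--                 t = tuple(state[i] for i in g)
--                 if t not in seen: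
--                     seen.add(t)
--                     frontier.append(t)
--         levels.append(frontier)
--     distances = {}
--     d = 0
--     for level in levels:
--         for s in level:
--             distances[s] = d
--         d += 1
--     return distances
-- ===== Notes on version B (the rewrite author's own statement) =====
-- stated objective: alternative
-- what changed: B separates search from labeling: it enumerates the reachable states level by level keeping only a plain visited set (no distances exist during the search), stores the levels as a list of lists, and builds the distance dict in a single final pass over that list with a running counter; A interleaves a FIFO queue with per-state distance lookups and inserts into one dict.
import Mathlib
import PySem

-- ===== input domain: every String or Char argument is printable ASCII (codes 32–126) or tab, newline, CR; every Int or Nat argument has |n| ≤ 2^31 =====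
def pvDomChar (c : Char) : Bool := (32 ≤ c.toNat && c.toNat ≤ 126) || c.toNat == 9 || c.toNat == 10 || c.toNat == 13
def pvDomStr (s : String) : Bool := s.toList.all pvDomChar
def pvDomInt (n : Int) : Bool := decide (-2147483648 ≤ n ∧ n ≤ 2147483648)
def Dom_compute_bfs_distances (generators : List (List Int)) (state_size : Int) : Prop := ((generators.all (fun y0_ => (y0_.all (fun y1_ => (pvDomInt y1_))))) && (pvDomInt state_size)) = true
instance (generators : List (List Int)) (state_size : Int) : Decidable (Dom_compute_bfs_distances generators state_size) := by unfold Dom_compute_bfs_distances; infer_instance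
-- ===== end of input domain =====

-- B stages the work: it first enumerates the reachable states level by level with only a
-- visited SET (no distances during the search), then labels each level in one final pass;
-- A interleaves a FIFO queue with per-state distance lookups/inserts in a single dict.

-- ===== PORT A =====
-- new_state = tuple(state[i] for i in g); the .getD 0 default is never taken under
-- Pre_ (every index is in range there), where Python would raise IndexError.
def pvNewState (state g : List Int) : List Int :=
  g.map (fun i => (PySem.List.pyGet? state i).getD 0)

-- fuel bound shared by both loops: strictly more than the number of distinct reachable
-- states under Pre_ (a totality guard only — never exhausted inside Pre_, see pvMainLemma)
def pvFuel (generators : List (List Int)) (state_size : Int) : Nat :=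
  (state_size.toNat + (generators.map List.length).sum + 2) ^
    (state_size.toNat + (generators.map List.length).sum + 2) + 1

-- A's while loop: one dequeue per step; fuel counts dequeues.
def pvALoop (generators : List (List Int)) : Nat → PySem.Dict (List Int) Int → List (List Int) → PySem.Dict (List Int) Int
  | _, distances, [] => distances
  | 0, distances, _ :: _ => distances
  | fuel + 1, distances, state :: rest =>
      -- current_distance = distances[state]; the lookup never misses (queued states are keys)
      let current_distance := (distances.get? state).getD 0
      let r := generators.foldl
        (fun (p : PySem.Dict (List Int) Int × List (List Int)) g =>
          let new_state := pvNewState state g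
          if p.1.contains new_state then p
          else (p.1.insert new_state (current_distance + 1), p.2 ++ [new_state]))
        (distances, rest)
      pvALoop generators fuel r.1 r.2

def compute_bfs_distances (generators : List (List Int)) (state_size : Int) : List (List Int × Int) :=
  let sorted_state := PySem.List.pyRange 0 state_size 1
  let distances := PySem.Dict.ofList [(sorted_state, (0 : Int))]
  (pvALoop generators (pvFuel generators state_size) distances [sorted_state]).items

-- ===== PORT B =====
-- Source B's inner double loop: expand one frontier state into (seen, frontier);
-- 'seen' is a Python set (PySem.Set), no distances are computed here.
def pvExpandB (generators : List (List Int))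
    (p : PySem.Set (List Int) × List (List Int)) (state : List Int) :
    PySem.Set (List Int) × List (List Int) :=
  generators.foldl
    (fun p g =>
      let t := pvNewState state g
      if PySem.Set.contains p.1 t then p
      else (PySem.Set.add p.1 t, p.2 ++ [t]))
    p

-- Source B's while loop: builds the list 'levels' (the final empty frontier included);
-- fuel counts levels (totality guard only).
def pvBLevels (generators : List (List Int)) : Nat → PySem.Set (List Int) → List (List Int) → List (List (List Int))
  | _, _, [] => [[]]
  | 0, _, f => [f]
  | fuel + 1, seen, f =>
      let r := f.foldl (pvExpandB generators) (seen, [])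
      f :: pvBLevels generators fuel r.1 r.2

def compute_bfs_distances_alt (generators : List (List Int)) (state_size : Int) : List (List Int × Int) :=
  let start := PySem.List.pyRange 0 state_size 1
  let levels := pvBLevels generators (pvFuel generators state_size) (PySem.Set.ofList [start]) [start]
  -- final labeling pass: distances[s] = d for s in level, d += 1 per level
  (levels.foldl
    (fun (p : PySem.Dict (List Int) Int × Int) level =>
      (level.foldl (fun dd s => dd.insert s p.2) p.1, p.2 + 1))
    (PySem.Dict.empty, 0)).1.items

-- ===== PRECONDITION & SPEC =====
-- the minimum length of a reachable state: min(len(range(state_size)), min |g|)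
def pvMinLen (generators : List (List Int)) (state_size : Int) : Int :=
  (generators.map (fun g => (g.length : Int))).foldr min (max state_size 0)

-- Pre_ excludes exactly the inputs on which Python A raises IndexError: some generator entry
-- is out of range for the shortest reachable state (every generator is applied to a state of
-- every reachable length, and the reachable lengths are len(range(state_size)) and all |g|).
def Pre_compute_bfs_distances (generators : List (List Int)) (state_size : Int) : Prop :=
  ∀ g ∈ generators, ∀ i ∈ g,
    -(pvMinLen generators state_size) ≤ i ∧ i < pvMinLen generators state_size
instance (generators : List (List Int)) (state_size : Int) : Decidable (Pre_compute_bfs_distances generators state_size) := by unfold Pre_compute_bfs_distances; infer_instance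
def pvWitness_compute_bfs_distances : List (List Int) × Int := ([[1, 0, 2], [1, 2, 0]], 3)

def Spec_compute_bfs_distances (generators : List (List Int)) (state_size : Int) (out : List (List Int × Int)) : Prop := out = compute_bfs_distances_alt generators state_size
instance (generators : List (List Int)) (state_size : Int) (out : List (List Int × Int)) : Decidable (Spec_compute_bfs_distances generators state_size out) := by unfold Spec_compute_bfs_distances; infer_instance

-- ===== CLAIM (what is proved, stated in full; the proofs are below) =====
def Claim_equal_compute_bfs_distances : Prop := ∀ (generators : List (List Int)) (state_size : Int), Dom_compute_bfs_distances generators state_size → Pre_compute_bfs_distances generators state_size → Spec_compute_bfs_distances generators state_size (compute_bfs_distances generators state_size)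

-- ===== LEMMAS AND PROOFS =====

-- A's inner-loop body, named for the proofs (v = current_distance + 1)
def pvStep (v : Int) (state : List Int)
    (p : PySem.Dict (List Int) Int × List (List Int)) (g : List Int) :
    PySem.Dict (List Int) Int × List (List Int) :=
  let new_state := pvNewState state g
  if p.1.contains new_state then p
  else (p.1.insert new_state v, p.2 ++ [new_state])

-- the dict-level analogue of pvExpandB, used to describe A's draining of one frontier
def pvExpand (gens : List (List Int)) (level : Int)
    (p : PySem.Dict (List Int) Int × List (List Int)) (state : List Int) :
    PySem.Dict (List Int) Int × List (List Int) :=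
  gens.foldl (pvStep (level + 1) state) p

-- B's inner-loop body, named for the proofs
def pvStepB (state : List Int)
    (p : PySem.Set (List Int) × List (List Int)) (g : List Int) :
    PySem.Set (List Int) × List (List Int) :=
  let t := pvNewState state g
  if PySem.Set.contains p.1 t then p
  else (PySem.Set.add p.1 t, p.2 ++ [t])

-- the pairs (state, distance) contributed by a list of levels starting at distance l
def pvPairs : Int → List (List (List Int)) → List (List Int × Int)
  | _, [] => []
  | l, lv :: rest => lv.map (fun s => (s, l)) ++ pvPairs (l + 1) rest

-- the dict's keys and the set hold the same states
def pvSync (d : PySem.Dict (List Int) Int) (S : PySem.Set (List Int)) : Prop :=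
  ∀ k, d.contains k = true ↔ k ∈ S

-- a reachable state: length between M and K, entries in [0, n)
def pvValid (n K : Nat) (M : Int) (s : List Int) : Prop :=
  M ≤ (s.length : Int) ∧ s.length ≤ K ∧ ∀ x ∈ s, 0 ≤ x ∧ x < (n : Int)

theorem pvALoop_nil (gens : List (List Int)) (f : Nat) (d : PySem.Dict (List Int) Int) :
    pvALoop gens f d [] = d := by cases f <;> rfl

theorem pvALoop_cons (gens : List (List Int)) (f : Nat) (d : PySem.Dict (List Int) Int)
    (s : List Int) (rest : List (List Int)) :
    pvALoop gens (f + 1) d (s :: rest) =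
      pvALoop gens f (gens.foldl (pvStep ((d.get? s).getD 0 + 1) s) (d, rest)).1
        (gens.foldl (pvStep ((d.get? s).getD 0 + 1) s) (d, rest)).2 := rfl

theorem pvExpandB_eq (gens : List (List Int))
    (p : PySem.Set (List Int) × List (List Int)) (s : List Int) :
    pvExpandB gens p s = gens.foldl (pvStepB s) p := rfl

-- the accumulator of a pvStep fold is only appended to, and the dict part ignores it
theorem pvStep_fold_acc (v : Int) (s : List Int) (gens : List (List Int)) :
    ∀ (d : PySem.Dict (List Int) Int) (acc : List (List Int)),
    gens.foldl (pvStep v s) (d, acc) =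
      ((gens.foldl (pvStep v s) (d, [])).1, acc ++ (gens.foldl (pvStep v s) (d, [])).2) := by
  induction gens with
  | nil => intro d acc; simp
  | cons g gs ih =>
    intro d acc
    simp only [List.foldl_cons, pvStep]
    by_cases h : d.contains (pvNewState s g) = true
    · simp only [h, if_true]; exact ih d acc
    · simp only [h, if_false, Bool.false_eq_true]
      rw [ih (d.insert (pvNewState s g) v) (acc ++ [pvNewState s g]),
          ih (d.insert (pvNewState s g) v) ([] ++ [pvNewState s g])]
      simp

-- existing bindings survive a pvStep fold (inserts happen only at absent keys)
theorem pvStep_get?_mono (v : Int) (s : List Int) (gens : List (List Int)) :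
    ∀ (p : PySem.Dict (List Int) Int × List (List Int)) (k : List Int) (w : Int),
    p.1.get? k = some w → (gens.foldl (pvStep v s) p).1.get? k = some w := by
  induction gens with
  | nil => intro p k w h; exact h
  | cons g gs ih =>
    intro p k w h
    simp only [List.foldl_cons, pvStep]
    by_cases hc : p.1.contains (pvNewState s g) = true
    · simp only [hc, if_true]; exact ih p k w h
    · simp only [hc, if_false, Bool.false_eq_true]
      apply ih
      have hne : k ≠ pvNewState s g := by
        intro he
        rw [PySem.Dict.contains_eq_isSome_get?, ← he, h] at hc
        simp at hc
      rw [PySem.Dict.get?_insert_of_ne _ _ hne]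
      exact h

-- every state in the accumulator of a pvStep fold is bound to v in the dict
theorem pvStep_fold_acc_val (v : Int) (s : List Int) (gens : List (List Int)) :
    ∀ (p : PySem.Dict (List Int) Int × List (List Int)),
    (∀ t ∈ p.2, p.1.get? t = some v) →
    ∀ t ∈ (gens.foldl (pvStep v s) p).2, (gens.foldl (pvStep v s) p).1.get? t = some v := by
  induction gens with
  | nil => intro p h; exact h
  | cons g gs ih =>
    intro p h
    simp only [List.foldl_cons, pvStep]
    by_cases hc : p.1.contains (pvNewState s g) = true
    · simp only [hc, if_true]; exact ih p h
    · simp only [hc, if_false, Bool.false_eq_true]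
      apply ih
      intro t ht
      rcases List.mem_append.mp ht with ht | ht
      · have := h t ht
        have hne : t ≠ pvNewState s g := by
          intro he
          rw [PySem.Dict.contains_eq_isSome_get?, ← he, this] at hc
          simp at hc
        rw [PySem.Dict.get?_insert_of_ne _ _ hne]
        exact this
      · simp only [List.mem_singleton] at ht
        subst ht
        exact PySem.Dict.get?_insert_self _ _ _

theorem pvExpand_fold_acc_val (gens : List (List Int)) (level : Int) (q : List (List Int)) :
    ∀ (p : PySem.Dict (List Int) Int × List (List Int)),
    (∀ t ∈ p.2, p.1.get? t = some (level + 1)) →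
    ∀ t ∈ (q.foldl (pvExpand gens level) p).2,
      (q.foldl (pvExpand gens level) p).1.get? t = some (level + 1) := by
  induction q with
  | nil => intro p h; exact h
  | cons s q ih =>
    intro p h
    simp only [List.foldl_cons, pvExpand]
    exact ih _ (pvStep_fold_acc_val _ _ _ p h)

-- keys stay Nodup through a pvStep fold
theorem pvStep_nodup (v : Int) (s : List Int) (gens : List (List Int)) :
    ∀ (p : PySem.Dict (List Int) Int × List (List Int)),
    p.1.keys.Nodup → (gens.foldl (pvStep v s) p).1.keys.Nodup := by
  induction gens with
  | nil => intro p h; exact h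
  | cons g gs ih =>
    intro p h
    simp only [List.foldl_cons, pvStep]
    by_cases hc : p.1.contains (pvNewState s g) = true
    · simp only [hc, if_true]; exact ih p h
    · simp only [hc, if_false, Bool.false_eq_true]
      exact ih _ (PySem.Dict.nodup_keys_insert _ _ _ h)

theorem pvExpand_nodup (gens : List (List Int)) (level : Int) (q : List (List Int)) :
    ∀ (p : PySem.Dict (List Int) Int × List (List Int)),
    p.1.keys.Nodup → (q.foldl (pvExpand gens level) p).1.keys.Nodup := by
  induction q with
  | nil => intro p h; exact h
  | cons s q ih =>
    intro p h
    simp only [List.foldl_cons, pvExpand]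
    exact ih _ (pvStep_nodup _ _ _ p h)

-- a move applied to a reachable state yields a reachable state
theorem pvNewState_valid (n K : Nat) (M : Int) (state g : List Int)
    (hs : pvValid n K M state) (hMg : M ≤ (g.length : Int)) (hKg : g.length ≤ K)
    (hg : ∀ i ∈ g, -M ≤ i ∧ i < M) : pvValid n K M (pvNewState state g) := by
  refine ⟨by simp [pvNewState]; exact hMg, by simp [pvNewState]; exact hKg, ?_⟩
  intro x hx
  simp only [pvNewState, List.mem_map] at hx
  obtain ⟨i, hi, hxi⟩ := hx
  obtain ⟨hlo, hhi⟩ := hg i hi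
  have hlen : M ≤ (state.length : Int) := hs.1
  cases hget : PySem.List.pyGet? state i with
  | none =>
    exfalso
    rw [PySem.List.pyGet?_eq_none_iff] at hget
    exact hget ⟨by omega, by omega⟩
  | some y =>
    have hy := PySem.List.mem_of_pyGet?_eq_some state hget
    rw [← hxi, hget]
    exact hs.2.2 y hy

-- all keys reachable is preserved through a pvStep fold (given a reachable source state)
theorem pvStep_keys_valid (n K : Nat) (M : Int) (v : Int) (s : List Int)
    (gens : List (List Int)) (hs : pvValid n K M s)
    (hgens : ∀ g ∈ gens, M ≤ (g.length : Int) ∧ g.length ≤ K ∧ ∀ i ∈ g, -M ≤ i ∧ i < M) :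
    ∀ (p : PySem.Dict (List Int) Int × List (List Int)),
    (∀ k ∈ p.1.keys, pvValid n K M k) →
    ∀ k ∈ (gens.foldl (pvStep v s) p).1.keys, pvValid n K M k := by
  induction gens with
  | nil => intro p h; exact h
  | cons g gs ih =>
    intro p h
    simp only [List.foldl_cons, pvStep]
    have hgs : ∀ g' ∈ gs, M ≤ (g'.length : Int) ∧ g'.length ≤ K ∧ ∀ i ∈ g', -M ≤ i ∧ i < M :=
      fun g' hg' => hgens g' (List.mem_cons_of_mem _ hg')
    by_cases hc : p.1.contains (pvNewState s g) = true
    · simp only [hc, if_true]; exact ih hgs p h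
    · simp only [hc, if_false, Bool.false_eq_true]
      apply ih hgs
      intro k hk
      rcases (PySem.Dict.mem_keys_insert _ _ _ _).mp hk with hk | hk
      · subst hk
        obtain ⟨h1, h2, h3⟩ := hgens g (List.mem_cons_self)
        exact pvNewState_valid n K M s g hs h1 h2 h3
      · exact h k hk

-- all keys reachable is preserved through a level fold (frontier states are keys)
theorem pvExpand_keys_valid (n K : Nat) (M : Int) (gens : List (List Int)) (level : Int)
    (hgens : ∀ g ∈ gens, M ≤ (g.length : Int) ∧ g.length ≤ K ∧ ∀ i ∈ g, -M ≤ i ∧ i < M)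
    (q : List (List Int)) :
    ∀ (p : PySem.Dict (List Int) Int × List (List Int)),
    (∀ s ∈ q, pvValid n K M s) →
    (∀ k ∈ p.1.keys, pvValid n K M k) →
    ∀ k ∈ (q.foldl (pvExpand gens level) p).1.keys, pvValid n K M k := by
  induction q with
  | nil => intro p _ h; exact h
  | cons s q ih =>
    intro p hq h
    simp only [List.foldl_cons]
    exact ih _ (fun t ht => hq t (List.mem_cons_of_mem _ ht))
      (pvStep_keys_valid n K M (level + 1) s gens (hq s List.mem_cons_self) hgens p h)

-- size bookkeeping: each append to the accumulator is one fresh key inserted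
theorem pvStep_size (v : Int) (s : List Int) (gens : List (List Int)) :
    ∀ (p : PySem.Dict (List Int) Int × List (List Int)),
    (gens.foldl (pvStep v s) p).1.size + p.2.length =
      p.1.size + (gens.foldl (pvStep v s) p).2.length := by
  induction gens with
  | nil => intro p; rfl
  | cons g gs ih =>
    intro p
    simp only [List.foldl_cons, pvStep]
    by_cases hc : p.1.contains (pvNewState s g) = true
    · simp only [hc, if_true]; exact ih p
    · simp only [hc, if_false, Bool.false_eq_true]
      have := ih (p.1.insert (pvNewState s g) v, p.2 ++ [pvNewState s g])
      simp only [List.length_append, List.length_singleton] at this ⊢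
      have hins : (p.1.insert (pvNewState s g) v).size = p.1.size + 1 := by
        simp [PySem.Dict.size_insert, hc]
      omega

theorem pvExpand_size (gens : List (List Int)) (level : Int) (q : List (List Int)) :
    ∀ (p : PySem.Dict (List Int) Int × List (List Int)),
    (q.foldl (pvExpand gens level) p).1.size + p.2.length =
      p.1.size + (q.foldl (pvExpand gens level) p).2.length := by
  induction q with
  | nil => intro p; rfl
  | cons s q ih =>
    intro p
    simp only [List.foldl_cons, pvExpand]
    have h1 := pvStep_size (level + 1) s gens p
    have h2 := ih (gens.foldl (pvStep (level + 1) s) p)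
    omega

-- a pvStep fold appends exactly its new frontier states, all bound to v
theorem pvStep_items (v : Int) (s : List Int) (gens : List (List Int)) :
    ∀ (d : PySem.Dict (List Int) Int),
    (gens.foldl (pvStep v s) (d, [])).1.items =
      d.items ++ ((gens.foldl (pvStep v s) (d, [])).2).map (fun t => (t, v)) := by
  induction gens with
  | nil => intro d; simp
  | cons g gs ih =>
    intro d
    simp only [List.foldl_cons, pvStep]
    by_cases hc : d.contains (pvNewState s g) = true
    · simp only [hc, if_true]; exact ih d
    · simp only [hc, if_false, Bool.false_eq_true]
      rw [pvStep_fold_acc v s gs (d.insert (pvNewState s g) v) ([] ++ [pvNewState s g])]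
      simp only [List.nil_append]
      rw [ih (d.insert (pvNewState s g) v)]
      rw [PySem.Dict.items_insert_of_not_contains _ _ (Bool.eq_false_iff.mpr hc)]
      simp

-- the accumulator of a level fold is only appended to
theorem pvExpand_fold_acc (gens : List (List Int)) (level : Int) (q : List (List Int)) :
    ∀ (d : PySem.Dict (List Int) Int) (acc : List (List Int)),
    q.foldl (pvExpand gens level) (d, acc) =
      ((q.foldl (pvExpand gens level) (d, [])).1,
        acc ++ (q.foldl (pvExpand gens level) (d, [])).2) := by
  induction q with
  | nil => intro d acc; simp
  | cons s q ih =>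
    intro d acc
    simp only [List.foldl_cons, pvExpand]
    rw [pvStep_fold_acc (level + 1) s gens d acc, pvStep_fold_acc (level + 1) s gens d []]
    simp only [List.nil_append]
    rw [ih ((gens.foldl (pvStep (level + 1) s) (d, [])).1)
          (acc ++ (gens.foldl (pvStep (level + 1) s) (d, [])).2),
        ih ((gens.foldl (pvStep (level + 1) s) (d, [])).1)
          ((gens.foldl (pvStep (level + 1) s) (d, [])).2)]
    simp

-- a level fold appends exactly its new frontier, all bound to level+1
theorem pvExpand_items (gens : List (List Int)) (level : Int) (q : List (List Int)) :
    ∀ (d : PySem.Dict (List Int) Int),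
    (q.foldl (pvExpand gens level) (d, [])).1.items =
      d.items ++ ((q.foldl (pvExpand gens level) (d, [])).2).map (fun t => (t, level + 1)) := by
  induction q with
  | nil => intro d; simp
  | cons s q ih =>
    intro d
    simp only [List.foldl_cons, pvExpand]
    rw [pvStep_fold_acc (level + 1) s gens d []]
    simp only [List.nil_append]
    rw [pvExpand_fold_acc gens level q ((gens.foldl (pvStep (level + 1) s) (d, [])).1)
          ((gens.foldl (pvStep (level + 1) s) (d, [])).2)]
    simp only []
    rw [ih ((gens.foldl (pvStep (level + 1) s) (d, [])).1)]
    rw [pvStep_items (level + 1) s gens d]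
    simp

-- one generator fold: the set side mirrors the dict side (same frontier, synced membership)
theorem pvStep_sync (v : Int) (s : List Int) (gens : List (List Int)) :
    ∀ (d : PySem.Dict (List Int) Int) (S : PySem.Set (List Int)) (acc : List (List Int)),
    pvSync d S →
    (gens.foldl (pvStepB s) (S, acc)).2 = (gens.foldl (pvStep v s) (d, acc)).2 ∧
    pvSync (gens.foldl (pvStep v s) (d, acc)).1 (gens.foldl (pvStepB s) (S, acc)).1 := by
  induction gens with
  | nil => intro d S acc h; exact ⟨rfl, h⟩
  | cons g gs ih =>
    intro d S acc h
    simp only [List.foldl_cons, pvStep, pvStepB]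
    have hbeq : d.contains (pvNewState s g) = PySem.Set.contains S (pvNewState s g) := by
      rw [Bool.eq_iff_iff, h (pvNewState s g)]
      exact (PySem.Set.contains_iff S (pvNewState s g)).symm
    rw [← hbeq]
    by_cases hc : d.contains (pvNewState s g) = true
    · simp only [hc, if_true]; exact ih d S acc h
    · simp only [hc, if_false, Bool.false_eq_true]
      apply ih
      intro k
      rw [PySem.Dict.contains_insert]
      constructor
      · intro hk
        rcases Bool.or_eq_true_iff.mp hk with hk | hk
        · have : k = pvNewState s g := by simpa using hk
          exact (PySem.Set.mem_add _ _ _).mpr (Or.inr this)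
        · exact (PySem.Set.mem_add _ _ _).mpr (Or.inl ((h k).mp hk))
      · intro hk
        rcases (PySem.Set.mem_add _ _ _).mp hk with hk | hk
        · exact Bool.or_eq_true_iff.mpr (Or.inr ((h k).mpr hk))
        · exact Bool.or_eq_true_iff.mpr (Or.inl (by simpa using hk))

-- one level fold: same frontier and synced membership
theorem pvExpand_sync (gens : List (List Int)) (level : Int) (q : List (List Int)) :
    ∀ (d : PySem.Dict (List Int) Int) (S : PySem.Set (List Int)) (acc : List (List Int)),
    pvSync d S →
    (q.foldl (pvExpandB gens) (S, acc)).2 = (q.foldl (pvExpand gens level) (d, acc)).2 ∧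
    pvSync (q.foldl (pvExpand gens level) (d, acc)).1 (q.foldl (pvExpandB gens) (S, acc)).1 := by
  induction q with
  | nil => intro d S acc h; exact ⟨rfl, h⟩
  | cons s q ih =>
    intro d S acc h
    simp only [List.foldl_cons, pvExpand, pvExpandB_eq]
    obtain ⟨h2, h1⟩ := pvStep_sync (level + 1) s gens d S acc h
    have h3 := ih (List.foldl (pvStep (level + 1) s) (d, acc) gens).1
      (List.foldl (pvStepB s) (S, acc) gens).1
      (List.foldl (pvStep (level + 1) s) (d, acc) gens).2 h1
    rw [Prod.mk.eta] at h3
    rw [← h2] at h3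
    rw [Prod.mk.eta] at h3
    exact h3

-- pvBLevels always starts with its frontier argument
theorem pvBLevels_head (gens : List (List Int)) :
    ∀ (f : Nat) (S : PySem.Set (List Int)) (q : List (List Int)),
    pvBLevels gens f S q = q :: (pvBLevels gens f S q).tail := by
  intro f S q
  cases f with
  | zero => cases q <;> rfl
  | succ f => cases q <;> rfl

-- pvALoop preserves Nodup keys
theorem pvALoop_nodup (gens : List (List Int)) :
    ∀ (f : Nat) (d : PySem.Dict (List Int) Int) (q : List (List Int)),
    d.keys.Nodup → (pvALoop gens f d q).keys.Nodup := by
  intro f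
  induction f with
  | zero => intro d q h; cases q <;> simpa [pvALoop_nil, pvALoop]
  | succ f ih =>
    intro d q h
    cases q with
    | nil => rw [pvALoop_nil]; exact h
    | cons s rest =>
      rw [pvALoop_cons]
      exact ih _ _ (pvStep_nodup _ _ _ (d, rest) h)

-- the final labeling fold over levels is the insert-fold over pvPairs
theorem pvBuild (levels : List (List (List Int))) :
    ∀ (dct : PySem.Dict (List Int) Int) (n : Int),
    (levels.foldl
      (fun (p : PySem.Dict (List Int) Int × Int) level =>
        (level.foldl (fun dd s => dd.insert s p.2) p.1, p.2 + 1))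
      (dct, n)).1 =
    (pvPairs n levels).foldl (fun dd pr => dd.insert pr.1 pr.2) dct := by
  induction levels with
  | nil => intro dct n; rfl
  | cons lv rest ih =>
    intro dct n
    simp only [List.foldl_cons, pvPairs, List.foldl_append, List.foldl_map]
    exact ih _ _

-- at most (K+1)*(n+1)^K distinct lists of length ≤ K with entries in [0, n)
theorem pvCard (n K : Nat) (L : List (List Int)) (hnd : L.Nodup)
    (hv : ∀ s ∈ L, s.length ≤ K ∧ ∀ x ∈ s, 0 ≤ x ∧ x < (n : Int)) :
    L.length ≤ (K + 1) * (n + 1) ^ K := by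
  classical
  let f : List Int → Fin (K + 1) × (Fin K → Fin (n + 1)) := fun s =>
    (⟨s.length % (K + 1), Nat.mod_lt _ (by omega)⟩,
     fun i => ⟨(s.getD i.1 0).toNat % (n + 1), Nat.mod_lt _ (by omega)⟩)
  have hinj : Set.InjOn f ↑L.toFinset := by
    intro s₁ hs₁ s₂ hs₂ hf
    simp only [Finset.mem_coe, List.mem_toFinset] at hs₁ hs₂
    obtain ⟨hl₁, he₁⟩ := hv s₁ hs₁
    obtain ⟨hl₂, he₂⟩ := hv s₂ hs₂
    have hlen : s₁.length = s₂.length := by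
      have := congrArg (fun p => p.1.1) hf
      simp only [f] at this
      rw [Nat.mod_eq_of_lt (by omega), Nat.mod_eq_of_lt (by omega)] at this
      exact this
    apply List.ext_getElem hlen
    intro i hi₁ hi₂
    have hiK : i < K := by omega
    have := congrFun (congrArg (fun p => p.2) hf) ⟨i, hiK⟩
    simp only [f, Fin.mk.injEq] at this
    rw [List.getD_eq_getElem s₁ 0 hi₁, List.getD_eq_getElem s₂ 0 hi₂] at this
    obtain ⟨hlo₁, hhi₁⟩ := he₁ s₁[i] (List.getElem_mem hi₁)
    obtain ⟨hlo₂, hhi₂⟩ := he₂ s₂[i] (List.getElem_mem hi₂)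
    rw [Nat.mod_eq_of_lt (by omega), Nat.mod_eq_of_lt (by omega)] at this
    omega
  have hcard : L.toFinset.card ≤ Fintype.card (Fin (K + 1) × (Fin K → Fin (n + 1))) := by
    rw [← Finset.card_univ]
    exact Finset.card_le_card_of_injOn f (fun _ _ => Finset.mem_univ _) hinj
  rw [List.toFinset_card_of_nodup hnd] at hcard
  calc L.length ≤ Fintype.card (Fin (K + 1) × (Fin K → Fin (n + 1))) := hcard
    _ = (K + 1) * (n + 1) ^ K := by
        rw [Fintype.card_prod, Fintype.card_fun]
        simp

-- key lemma: A's loop drains one whole frontier exactly like a two-phase level fold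
theorem pvDrain (gens : List (List Int)) (level : Int) :
    ∀ (q extra : List (List Int)) (d : PySem.Dict (List Int) Int) (f : Nat),
    (∀ s ∈ q, d.get? s = some level) →
    pvALoop gens (f + q.length) d (q ++ extra) =
      pvALoop gens f (q.foldl (pvExpand gens level) (d, extra)).1
        (q.foldl (pvExpand gens level) (d, extra)).2 := by
  intro q
  induction q with
  | nil => intro extra d f _; simp
  | cons s q ih =>
    intro extra d f hq
    have hlen : f + (s :: q).length = (f + q.length) + 1 := by simp; omega
    rw [hlen, List.cons_append, pvALoop_cons]
    have hcur : (d.get? s).getD 0 = level := by rw [hq s List.mem_cons_self]; rfl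
    rw [hcur]
    have hsplit := pvStep_fold_acc (level + 1) s gens d (q ++ extra)
    rw [hsplit]
    have hassoc : q ++ extra ++ (gens.foldl (pvStep (level + 1) s) (d, [])).2 =
        q ++ (extra ++ (gens.foldl (pvStep (level + 1) s) (d, [])).2) := by
      rw [List.append_assoc]
    rw [hassoc]
    rw [ih (extra ++ (gens.foldl (pvStep (level + 1) s) (d, [])).2)
          ((gens.foldl (pvStep (level + 1) s) (d, [])).1) f
          (fun t ht => pvStep_get?_mono (level + 1) s gens (d, []) t level
            (hq t (List.mem_cons_of_mem _ ht)))]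
    have hfold : (s :: q).foldl (pvExpand gens level) (d, extra) =
        q.foldl (pvExpand gens level)
          ((gens.foldl (pvStep (level + 1) s) (d, [])).1,
            extra ++ (gens.foldl (pvStep (level + 1) s) (d, [])).2) := by
      simp only [List.foldl_cons, pvExpand]
      rw [pvStep_fold_acc (level + 1) s gens d extra]
    rw [hfold]

-- queued states are dict keys
theorem pvMemKeys (d : PySem.Dict (List Int) Int) (k : List Int) (w : Int)
    (h : d.get? k = some w) : k ∈ d.keys := by
  by_cases hk : k ∈ d.keys
  · exact hk
  · rw [(PySem.Dict.get?_eq_none_iff_not_mem_keys d k).mpr hk] at h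
    exact absurd h (by simp)

-- the main induction: queue BFS yields exactly the pairs of the remaining levels
theorem pvMainLemma (n K : Nat) (M : Int) (gens : List (List Int))
    (hgens : ∀ g ∈ gens, M ≤ (g.length : Int) ∧ g.length ≤ K ∧ ∀ i ∈ g, -M ≤ i ∧ i < M)
    (U : Nat) (hU : ∀ L : List (List Int), L.Nodup → (∀ s ∈ L, pvValid n K M s) → L.length ≤ U) :
    ∀ (f₂ f₁ : Nat) (level : Int) (d : PySem.Dict (List Int) Int)
      (S : PySem.Set (List Int)) (q : List (List Int)),
    d.keys.Nodup → (∀ k ∈ d.keys, pvValid n K M k) →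
    (∀ s ∈ q, d.get? s = some level) →
    pvSync d S →
    d.size ≤ U →
    (U - d.size) + q.length ≤ f₁ →
    (U - d.size) + 1 ≤ f₂ →
    (pvALoop gens f₁ d q).items =
      d.items ++ pvPairs (level + 1) (pvBLevels gens f₂ S q).tail := by
  intro f₂
  induction f₂ with
  | zero =>
    intro f₁ level d S q _ _ _ _ _ _ hf₂
    omega
  | succ f₂ ih =>
    intro f₁ level d S q hnd hval hq hsync hsz hf₁ hf₂
    match q with
    | [] =>
      rw [pvALoop_nil]
      have : pvBLevels gens (f₂ + 1) S [] = [[]] := rfl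
      rw [this]
      simp [pvPairs]
    | s :: q =>
      -- unfold B one level
      have hB : pvBLevels gens (f₂ + 1) S (s :: q) =
          (s :: q) :: pvBLevels gens f₂ ((s :: q).foldl (pvExpandB gens) (S, [])).1
            ((s :: q).foldl (pvExpandB gens) (S, [])).2 := rfl
      -- drain the frontier on the A side
      have hm : (s :: q).length ≤ f₁ := by omega
      have hdrain := pvDrain gens level (s :: q) [] d (f₁ - (s :: q).length) hq
      rw [List.append_nil, Nat.sub_add_cancel hm] at hdrain
      rw [hdrain]
      set R := (s :: q).foldl (pvExpand gens level) (d, []) with hRdef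
      obtain ⟨hBfr, hBsync⟩ := pvExpand_sync gens level (s :: q) d S [] hsync
      have hRnd : R.1.keys.Nodup := pvExpand_nodup gens level (s :: q) (d, []) hnd
      have hRval : ∀ k ∈ R.1.keys, pvValid n K M k := by
        apply pvExpand_keys_valid n K M gens level hgens (s :: q) (d, [])
        · intro t ht
          exact hval t (pvMemKeys d t level (hq t ht))
        · exact hval
      have hRq : ∀ t ∈ R.2, R.1.get? t = some (level + 1) :=
        pvExpand_fold_acc_val gens level (s :: q) (d, []) (by intro t ht; simp at ht)
      have hRitems : R.1.items = d.items ++ R.2.map (fun t => (t, level + 1)) :=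
        pvExpand_items gens level (s :: q) d
      have hRsz : R.1.size = d.size + R.2.length := by
        have := pvExpand_size gens level (s :: q) (d, [])
        simpa using this
      have hRle : R.1.size ≤ U := by
        have hkeys : R.1.size = R.1.keys.length := by
          simp [PySem.Dict.size, PySem.Dict.keys]
        rw [hkeys]
        exact hU R.1.keys hRnd hRval
      rw [hB, List.tail_cons]
      -- the B-side frontier is the A-side frontier
      rw [show ((s :: q).foldl (pvExpandB gens) (S, [])).2 = R.2 from hBfr]
      match hR2 : R.2 with
      | [] =>
        rw [pvALoop_nil]
        have : pvBLevels gens f₂ ((s :: q).foldl (pvExpandB gens) (S, [])).1 [] = [[]] := by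
          cases f₂ <;> rfl
        rw [this]
        simp [pvPairs, hRitems, hR2]
      | t :: ts =>
        rw [pvBLevels_head gens f₂ _ (t :: ts)]
        have hih := ih (f₁ - (s :: q).length) (level + 1) R.1
          ((s :: q).foldl (pvExpandB gens) (S, [])).1 (t :: ts)
          hRnd hRval (by rw [← hR2]; exact hRq) (by rw [← hR2] at *; exact hBsync) hRle
          (by rw [hR2] at hRsz; simp only [List.length_cons] at hRsz hf₁ ⊢; omega)
          (by rw [hR2] at hRsz; simp only [List.length_cons] at hRsz hf₂ ⊢; omega)
        rw [hih, hRitems, hR2]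
        simp [pvPairs, List.append_assoc]

-- pvMinLen / fold-max facts
theorem pvMinLen_cons (g : List Int) (gs : List (List Int)) (state_size : Int) :
    pvMinLen (g :: gs) state_size = min (g.length : Int) (pvMinLen gs state_size) := rfl

theorem pvMinLen_le_init (generators : List (List Int)) (state_size : Int) :
    pvMinLen generators state_size ≤ max state_size 0 := by
  induction generators with
  | nil => simp [pvMinLen]
  | cons g gs ih => rw [pvMinLen_cons]; exact le_trans (min_le_right _ _) ih

theorem pvMinLen_le_mem (state_size : Int) :
    ∀ (generators : List (List Int)) (g : List Int), g ∈ generators →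
    pvMinLen generators state_size ≤ (g.length : Int) := by
  intro gens
  induction gens with
  | nil => intro g hg; simp at hg
  | cons g' gs ih =>
    intro g hg
    rw [pvMinLen_cons]
    rw [List.mem_cons] at hg
    rcases hg with rfl | hg
    · exact min_le_left _ _
    · exact le_trans (min_le_right _ _) (ih g hg)

theorem pvMinLen_nonneg (generators : List (List Int)) (state_size : Int) :
    0 ≤ pvMinLen generators state_size := by
  induction generators with
  | nil => simp [pvMinLen]
  | cons g gs ih => rw [pvMinLen_cons]; exact le_min (Int.natCast_nonneg _) ih

theorem pvFoldMax_init_le (n : Nat) : ∀ l : List Nat, n ≤ l.foldr max n := by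
  intro l
  induction l with
  | nil => simp
  | cons x xs ih => exact le_trans ih (Nat.le_max_right _ _)

theorem pvFoldMax_mem_le (n : Nat) :
    ∀ (l : List Nat) (x : Nat), x ∈ l → x ≤ l.foldr max n := by
  intro l
  induction l with
  | nil => intro x hx; simp at hx
  | cons y ys ih =>
    intro x hx
    rw [List.mem_cons] at hx
    rcases hx with rfl | hx
    · exact Nat.le_max_left _ _
    · exact le_trans (ih x hx) (Nat.le_max_right _ _)

theorem pvFoldMax_le_add_sum (n : Nat) : ∀ l : List Nat, l.foldr max n ≤ n + l.sum := by
  intro l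
  induction l with
  | nil => simp
  | cons x xs ih =>
    simp only [List.foldr_cons, List.sum_cons]
    exact Nat.max_le.mpr ⟨by omega, by omega⟩

-- ===== VERDICT (by name: the statement is the Claim_ definition above) =====
theorem compute_bfs_distances_spec : Claim_equal_compute_bfs_distances := by
  intro gens sz _ hgens
  unfold Spec_compute_bfs_distances
  show (pvALoop gens (pvFuel gens sz) (PySem.Dict.ofList [(PySem.List.pyRange 0 sz 1, (0 : Int))]) [PySem.List.pyRange 0 sz 1]).items =
    ((pvBLevels gens (pvFuel gens sz) (PySem.Set.ofList [PySem.List.pyRange 0 sz 1]) [PySem.List.pyRange 0 sz 1]).foldl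
      (fun (p : PySem.Dict (List Int) Int × Int) level =>
        (level.foldl (fun dd s => dd.insert s p.2) p.1, p.2 + 1))
      (PySem.Dict.empty, 0)).1.items
  -- names for the bounds
  set n := sz.toNat with hn
  set M := pvMinLen gens sz with hM
  set K := (gens.map List.length).foldr max n with hK
  have hszn : max sz 0 = (n : Int) := by omega
  have hM0 : 0 ≤ M := pvMinLen_nonneg gens sz
  have hMsz : M ≤ (n : Int) := by rw [← hszn]; exact pvMinLen_le_init gens sz
  have hnK : n ≤ K := pvFoldMax_init_le n _
  have hKmem : ∀ g ∈ gens, g.length ≤ K := fun g hg =>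
    pvFoldMax_mem_le n _ g.length (List.mem_map_of_mem hg)
  have hgens' : ∀ g ∈ gens, M ≤ (g.length : Int) ∧ g.length ≤ K ∧ ∀ i ∈ g, -M ≤ i ∧ i < M :=
    fun g hg => ⟨pvMinLen_le_mem sz gens g hg, hKmem g hg, hgens g hg⟩
  -- the counting bound and the fuel
  have hKsum : K ≤ n + (gens.map List.length).sum := pvFoldMax_le_add_sum n _
  have hfuel : (K + 1) * (n + 1) ^ K + 1 ≤ pvFuel gens sz := by
    unfold pvFuel
    rw [← hn]
    set big := n + (gens.map List.length).sum + 2 with hbig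
    have h1 : K + 1 ≤ big := by omega
    have h2 : n + 1 ≤ big := by omega
    have hb1 : 1 ≤ big := by omega
    have hstep : (K + 1) * (n + 1) ^ K ≤ big ^ (K + 1) := by
      calc (K + 1) * (n + 1) ^ K ≤ big * big ^ K :=
            Nat.mul_le_mul h1 (Nat.pow_le_pow_left h2 K)
        _ = big ^ (K + 1) := by rw [pow_succ, Nat.mul_comm]
    have hmono : big ^ (K + 1) ≤ big ^ big := Nat.pow_le_pow_right hb1 (by omega)
    omega
  obtain ⟨U, hUdef⟩ : ∃ U, (K + 1) * (n + 1) ^ K = U := ⟨_, rfl⟩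
  obtain ⟨F, hFdef⟩ : ∃ F, pvFuel gens sz = F := ⟨_, rfl⟩
  rw [hUdef, hFdef] at hfuel
  rw [hFdef]
  have hU : ∀ L : List (List Int), L.Nodup → (∀ s ∈ L, pvValid n K M s) → L.length ≤ U :=
    fun L h1 h2 => hUdef ▸ pvCard n K L h1 (fun s hs => ⟨(h2 s hs).2.1, (h2 s hs).2.2⟩)
  have hvalid₀ : pvValid n K M (PySem.List.pyRange 0 sz 1) := by
    refine ⟨?_, ?_, ?_⟩
    · rw [PySem.List.length_pyRange_one]; omega
    · rw [PySem.List.length_pyRange_one]; omega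
    · intro x hx
      rw [PySem.List.mem_pyRange_one] at hx
      omega
  set start := PySem.List.pyRange 0 sz 1 with hstart
  have hd0 : PySem.Dict.ofList [(start, (0 : Int))] = PySem.Dict.empty.insert start 0 := rfl
  rw [hd0]
  set d₀ := PySem.Dict.empty.insert start (0 : Int) with hd₀
  set S₀ := PySem.Set.ofList [start] with hS₀
  set L := pvBLevels gens F S₀ [start] with hL
  have hsize1 : d₀.size = 1 := by
    simp [hd₀, PySem.Dict.size_insert, PySem.Dict.contains_empty]
  have hU1 : 1 ≤ U := by
    rw [← hUdef]
    exact Nat.mul_pos (by omega) (pow_pos (by omega) K)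
  have hnd₀ : d₀.keys.Nodup := PySem.Dict.nodup_keys_insert _ _ _ PySem.Dict.nodup_keys_empty
  have hsync₀ : pvSync d₀ S₀ := by
    intro k
    rw [hd₀, PySem.Dict.contains_insert]
    constructor
    · intro hk
      rcases Bool.or_eq_true_iff.mp hk with hk | hk
      · have : k = start := by simpa using hk
        rw [hS₀, this]
        exact (PySem.Set.mem_ofList _ _).mpr (List.mem_singleton.mpr rfl)
      · rw [PySem.Dict.contains_empty] at hk; exact absurd hk (by simp)
    · intro hk
      have : k = start := by
        have := (PySem.Set.mem_ofList _ _).mp (hS₀ ▸ hk)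
        simpa using this
      exact Bool.or_eq_true_iff.mpr (Or.inl (by simp [this]))
  -- A's items are the pairs of all the levels
  have hA : (pvALoop gens F d₀ [start]).items = d₀.items ++ pvPairs 1 L.tail := by
    have := pvMainLemma n K M gens hgens' U hU F F 0 d₀ S₀ [start]
      hnd₀
      (by
        intro k hk
        rcases (PySem.Dict.mem_keys_insert _ _ _ _).mp hk with hk | hk
        · subst hk; exact hvalid₀
        · simp [PySem.Dict.keys_empty] at hk)
      (by
        intro t ht
        simp only [List.mem_singleton] at ht
        subst ht
        exact PySem.Dict.get?_insert_self _ _ _)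
      hsync₀
      (by omega)
      (by simp only [List.length_cons, List.length_nil]; omega)
      (by omega)
    simpa using this
  have hd₀items : d₀.items = [(start, (0 : Int))] := rfl
  have hPairs : pvPairs 0 L = (pvALoop gens F d₀ [start]).items := by
    rw [hA, hd₀items]
    rw [show L = [start] :: L.tail from pvBLevels_head gens F S₀ [start]]
    simp [pvPairs]
  -- B's final labeling pass lays down exactly those pairs
  rw [pvBuild L PySem.Dict.empty 0]
  have hfresh : ∀ a ∈ pvPairs 0 L,
      (PySem.Dict.empty : PySem.Dict (List Int) Int).contains a.1 = false :=
    fun a _ => PySem.Dict.contains_empty _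
  have hndkeys : ((pvPairs 0 L).map Prod.fst).Nodup := by
    have hnodup : (pvALoop gens F d₀ [start]).keys.Nodup := pvALoop_nodup gens F d₀ [start] hnd₀
    have hkeys : (pvALoop gens F d₀ [start]).keys =
        (pvALoop gens F d₀ [start]).items.map Prod.fst := rfl
    rw [hPairs, ← hkeys]
    exact hnodup
  have := PySem.Dict.items_foldl_insert_fresh (pvPairs 0 L) Prod.fst Prod.snd
    PySem.Dict.empty hfresh hndkeys
  rw [show (fun (dd : PySem.Dict (List Int) Int) (pr : List Int × Int) => dd.insert pr.1 pr.2) =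
        (fun (dd : PySem.Dict (List Int) Int) (pr : List Int × Int) => dd.insert (Prod.fst pr) (Prod.snd pr)) from rfl]
  rw [this]
  rw [hPairs]
  simp
  rfl
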